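-- pv_equiv track=rewrite | github.com/iaime/LBUM | scripts/utils.py | get_regions_of_interest
-- ===== SOURCE A (Python) =====
-- def get_regions_of_interest(sequence, sites, remove_non_aa_chars):
--     #replace every aa in non interesting regions with '-' character
--     #the given sites are 1-indexed
--     mod_sequence = []
--     for i,aa in enumerate(sequence):
--         if i+1 in sites:#+1 because the given sites are 1-indexed
--             mod_sequence.append(aa)
--         else:
--             mod_sequence.append('-')
--     return ''.join(mod_sequence).replace('-', '') if remove_non_aa_chars else ''.join(mod_sequence)
-- ===== SOURCE B (Python) =====
-- def get_regions_of_interest(sequence, sites, remove_non_aa_chars):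
--     # Scatter: pre-fill a masked buffer and write kept chars in by index.
--     out = ['-'] * len(sequence)
--     for site in sites:
--         if 1 <= site <= len(sequence):
--             out[site - 1] = sequence[site - 1]
--     result = ''.join(out)
--     return result.replace('-', '') if remove_non_aa_chars else result
-- ===== Notes on version B (the rewrite author's own statement) =====
-- stated objective: faster
-- what changed: Instead of scanning the sequence and testing 'i+1 in sites' (a linear scan of sites per character), B pre-fills a '-' buffer and scatters the kept characters by iterating over sites and writing at index site-1; the dash-removal tail is unchanged.
import Mathlib
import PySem

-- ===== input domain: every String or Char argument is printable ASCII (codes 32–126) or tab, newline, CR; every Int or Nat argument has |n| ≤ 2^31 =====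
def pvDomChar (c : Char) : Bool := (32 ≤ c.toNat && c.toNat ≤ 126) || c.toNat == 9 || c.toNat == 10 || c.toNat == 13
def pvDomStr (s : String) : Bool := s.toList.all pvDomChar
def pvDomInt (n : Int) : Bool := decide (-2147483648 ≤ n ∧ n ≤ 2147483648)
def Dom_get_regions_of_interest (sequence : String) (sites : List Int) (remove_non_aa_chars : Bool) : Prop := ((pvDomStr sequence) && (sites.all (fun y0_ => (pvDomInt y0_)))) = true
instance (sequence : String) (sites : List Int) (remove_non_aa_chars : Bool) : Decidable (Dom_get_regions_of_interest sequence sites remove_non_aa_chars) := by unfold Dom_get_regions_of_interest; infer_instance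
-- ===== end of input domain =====

-- B replaces A's per-character membership scan over `sites` with a scatter write into a
-- pre-masked buffer (objective: faster); return values agree on all inputs.

-- ===== PORT A =====
-- for i,aa in enumerate(sequence): append aa if i+1 in sites else '-'; join; optional replace
def get_regions_of_interest (sequence : String) (sites : List Int) (remove_non_aa_chars : Bool) : String :=
  let mod_sequence : List Char :=
    (PySem.List.enumerate sequence.toList).foldl
      (fun acc p => if (p.1 + 1) ∈ sites then acc ++ [p.2] else acc ++ ['-']) []
  if remove_non_aa_chars then PySem.Str.replace (String.mk mod_sequence) "-" ""
  else String.mk mod_sequence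

-- ===== PORT B =====
-- out = ['-']*len(sequence); for site in sites: if 1 <= site <= len: out[site-1] = sequence[site-1]
def get_regions_of_interest_alt (sequence : String) (sites : List Int) (remove_non_aa_chars : Bool) : String :=
  let cs := sequence.toList
  let out : List Char :=
    sites.foldl
      (fun out site =>
        if 1 ≤ site ∧ site ≤ (cs.length : Int) then
          out.set (site - 1).toNat (cs.getD (site - 1).toNat '-')
        else out)
      (List.replicate cs.length '-')
  if remove_non_aa_chars then PySem.Str.replace (String.mk out) "-" ""
  else String.mk out

-- ===== PRECONDITION & SPEC =====
def Spec_get_regions_of_interest (sequence : String) (sites : List Int) (remove_non_aa_chars : Bool) (out : String) : Prop := out = get_regions_of_interest_alt sequence sites remove_non_aa_chars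
instance (sequence : String) (sites : List Int) (remove_non_aa_chars : Bool) (out : String) : Decidable (Spec_get_regions_of_interest sequence sites remove_non_aa_chars out) := by unfold Spec_get_regions_of_interest; infer_instance

-- ===== CLAIM (what is proved, stated in full; the proofs are below) =====
def Claim_equal_get_regions_of_interest : Prop := ∀ (sequence : String) (sites : List Int) (remove_non_aa_chars : Bool), Dom_get_regions_of_interest sequence sites remove_non_aa_chars → Spec_get_regions_of_interest sequence sites remove_non_aa_chars (get_regions_of_interest sequence sites remove_non_aa_chars)

-- ===== LEMMAS AND PROOFS =====

-- Characterisation of B's scatter buffer, index by index.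
lemma scatter_getElem? (cs : List Char) (sites : List Int) (b : List Char)
    (hb : b.length = cs.length) (i : Nat) :
    (sites.foldl
      (fun out site =>
        if 1 ≤ site ∧ site ≤ (cs.length : Int) then
          out.set (site - 1).toNat (cs.getD (site - 1).toNat '-')
        else out) b)[i]? =
    if ((i : Int) + 1) ∈ sites then cs[i]? else b[i]? := by
  induction sites generalizing b with
  | nil => simp
  | cons s rest ih =>
      simp only [List.foldl_cons]
      set b' := if 1 ≤ s ∧ s ≤ (cs.length : Int) then
          b.set (s - 1).toNat (cs.getD (s - 1).toNat '-') else b with hb'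
      have hb'len : b'.length = cs.length := by
        rw [hb']; split_ifs <;> simp [hb]
      rw [ih b' hb'len]
      by_cases hrest : ((i : Int) + 1) ∈ rest
      · simp [hrest]
      · by_cases hs : s = (i : Int) + 1
        · subst hs
          simp only [List.mem_cons, hrest, or_false, if_pos rfl, hb']
          by_cases hi : i < cs.length
          · have hcond : (1 : Int) ≤ (i : Int) + 1 ∧ (i : Int) + 1 ≤ (cs.length : Int) := by
              constructor <;> omega
            rw [if_pos hcond]
            have htn : ((i : Int) + 1 - 1).toNat = i := by omega
            rw [htn, List.getElem?_set]
            simp [hb, hi, List.getD_eq_getElem, List.getElem?_eq_getElem hi]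
          · have hcond : ¬ ((1 : Int) ≤ (i : Int) + 1 ∧ (i : Int) + 1 ≤ (cs.length : Int)) := by
              push_neg; intro _; omega
            rw [if_neg hcond]
            rw [List.getElem?_eq_none (by omega), List.getElem?_eq_none (by omega)]
            simp
        · have hnm : ¬ ((i : Int) + 1) ∈ s :: rest := by
            simp only [List.mem_cons]
            push_neg
            exact ⟨fun h => hs h.symm, hrest⟩
          rw [if_neg hnm, hb']
          split_ifs with hc
          · rw [List.getElem?_set, if_neg (by omega)]
          · rfl

-- A's append loop is a map over the enumeration, and the two joined lists agree.
lemma lists_eq (cs : List Char) (sites : List Int) :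
    (PySem.List.enumerate cs).foldl
      (fun acc p => if (p.1 + 1) ∈ sites then acc ++ [p.2] else acc ++ ['-']) [] =
    sites.foldl
      (fun out site =>
        if 1 ≤ site ∧ site ≤ (cs.length : Int) then
          out.set (site - 1).toNat (cs.getD (site - 1).toNat '-')
        else out) (List.replicate cs.length '-') := by
  have hA : (PySem.List.enumerate cs).foldl
      (fun acc p => if (p.1 + 1) ∈ sites then acc ++ [p.2] else acc ++ ['-']) [] =
      (PySem.List.enumerate cs).map (fun p => if (p.1 + 1) ∈ sites then p.2 else '-') := by
    have h1 : (fun (acc : List Char) (p : Int × Char) =>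
        if (p.1 + 1) ∈ sites then acc ++ [p.2] else acc ++ ['-']) =
        (fun acc p => acc ++ [if (p.1 + 1) ∈ sites then p.2 else '-']) := by
      funext acc p; split_ifs <;> rfl
    rw [h1]
    simpa using PySem.List.foldl_append_singleton_eq_map
      (l := PySem.List.enumerate cs)
      (f := fun p => if (p.1 + 1) ∈ sites then p.2 else '-') (acc := [])
  rw [hA]
  apply List.ext_getElem?
  intro i
  rw [scatter_getElem? cs sites _ (by simp) i]
  rw [List.getElem?_map, PySem.List.getElem?_enumerate]
  by_cases hi : i < cs.length
  · rw [List.getElem?_eq_getElem hi]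
    simp only [Option.map_some]
    by_cases hm : ((i : Int) + 1) ∈ sites
    · simp [hm, List.getElem?_eq_getElem hi]
    · simp [hm, List.getElem?_replicate, hi]
  · rw [List.getElem?_eq_none (by omega)]
    split_ifs
    · simp [List.getElem?_eq_none (le_of_not_gt hi)]
    · simp [List.getElem?_replicate, hi]

-- ===== VERDICT (by name: the statement is the Claim_ definition above) =====
theorem get_regions_of_interest_spec : Claim_equal_get_regions_of_interest := by
  intro sequence sites remove_non_aa_chars _
  unfold Spec_get_regions_of_interest get_regions_of_interest get_regions_of_interest_alt
  simp only []
  rw [lists_eq sequence.toList sites]
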